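-- pv_equiv track=rewrite | github.com/amco3008/agent-mobile | skills/_skill-manager/scripts/learn.py | find_repeated_subsequences
-- ===== SOURCE A (Python) =====
-- from collections import Counter, defaultdict
-- from typing import Dict, List, Optional, Tuple
--
-- def find_repeated_subsequences(sequences: List[Tuple[str, ...]], min_len: int = 3, max_len: int = 7) -> Dict[Tuple[str, ...], int]:
--     """Find repeated subsequences across sessions using n-gram analysis."""
--     ngram_counts = Counter()
--
--     for seq in sequences:
--         # Generate all n-grams of varying lengths
--         for n in range(min_len, min(max_len + 1, len(seq) + 1)):
--             for i in range(len(seq) - n + 1):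
--                 ngram = seq[i:i + n]
--                 ngram_counts[ngram] += 1
--
--     # Filter to those appearing 2+ times
--     repeated = {ngram: count for ngram, count in ngram_counts.items() if count >= 2}
--
--     # Remove subsequences that are fully contained in longer sequences
--     final = {}
--     sorted_ngrams = sorted(repeated.keys(), key=len, reverse=True)
--
--     for ngram in sorted_ngrams:
--         # Check if this ngram is a subsequence of any already-included ngram
--         is_subsequence = False
--         for existing in final.keys():
--             if len(ngram) < len(existing):
--                 # Check if ngram appears in existing
--                 ngram_str = "->".join(ngram)
--                 existing_str = "->".join(existing)
--                 if ngram_str in existing_str: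
--                     is_subsequence = True
--                     break
--
--         if not is_subsequence:
--             final[ngram] = repeated[ngram]
--
--     return final
-- ===== SOURCE B (Python) =====
-- from collections import Counter
-- from typing import Dict, List, Tuple
--
--
-- def find_repeated_subsequences(sequences: List[Tuple[str, ...]], min_len: int = 3, max_len: int = 7) -> Dict[Tuple[str, ...], int]:
--     """Find repeated subsequences, dropping those contained in longer kept ones.
--
--     Instead of rescanning all kept n-grams for each candidate, we walk the
--     candidates in one pass (longest first) and maintain a hash set of every
--     substring of the joined form of the kept, strictly-longer n-grams; the
--     containment test becomes a single set lookup.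
--     """
--     ngram_counts = Counter()
--     for seq in sequences:
--         L = len(seq)
--         for n in range(min_len, min(max_len + 1, L + 1)):
--             for i in range(L - n + 1):
--                 ngram_counts[seq[i:i + n]] += 1
--
--     repeated = [(g, c) for g, c in ngram_counts.items() if c >= 2]
--     repeated.sort(key=lambda pair: len(pair[0]), reverse=True)
--
--     final = {}
--     subs = set()      # substrings of joined kept n-grams strictly longer than cur_len
--     pending = []      # joined strings of kept n-grams of the current length
--     cur_len = None
--     for g, c in repeated:
--         if cur_len is None or len(g) < cur_len:
--             # entering a shorter length class: longer kept strings become barriers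
--             for s in pending:
--                 for i in range(len(s) + 1):
--                     for j in range(i, len(s) + 1):
--                         subs.add(s[i:j])
--             pending = []
--             cur_len = len(g)
--         gs = "->".join(g)
--         if gs not in subs:
--             final[g] = c
--             pending.append(gs)
--     return final
-- ===== Notes on version B (the rewrite author's own statement) =====
-- stated objective: alternative
-- what changed: A rescans every already-kept n-gram for each candidate (a pairwise containment scan with substring tests); B makes one descending-length pass that maintains a hash set of all substrings of the joined kept longer n-grams, turning each containment test into a single set lookup.
import Mathlib
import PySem

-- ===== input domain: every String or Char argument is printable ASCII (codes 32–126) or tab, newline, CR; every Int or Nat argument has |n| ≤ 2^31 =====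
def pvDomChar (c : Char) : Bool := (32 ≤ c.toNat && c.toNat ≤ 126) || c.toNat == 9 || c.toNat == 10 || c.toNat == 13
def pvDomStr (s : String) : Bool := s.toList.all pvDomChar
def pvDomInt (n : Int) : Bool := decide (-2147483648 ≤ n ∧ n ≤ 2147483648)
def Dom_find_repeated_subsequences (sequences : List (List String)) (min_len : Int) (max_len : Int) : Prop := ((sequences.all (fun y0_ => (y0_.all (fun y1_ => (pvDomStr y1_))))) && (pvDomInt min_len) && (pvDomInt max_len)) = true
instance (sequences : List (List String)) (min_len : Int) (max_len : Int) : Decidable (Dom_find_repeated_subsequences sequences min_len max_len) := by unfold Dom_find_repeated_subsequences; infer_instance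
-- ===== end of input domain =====

-- B replaces A's pairwise "contained in an already-kept longer n-gram" rescan by one
-- descending-length pass that keeps a hash set of all substrings of the joined kept longer
-- n-grams and tests containment by set lookup (objective: alternative algorithm).

-- ===== PORT A =====
-- the n-gram counting loop (identical source text in Source A and Source B, shared by both ports)
def pvGramCounts (sequences : List (List String)) (min_len : Int) (max_len : Int) :
    PySem.Dict (List String) Int :=
  sequences.foldl (fun cnt seq =>
    (PySem.List.pyRange min_len (min (max_len + 1) ((seq.length : Int) + 1)) 1).foldl (fun cnt n =>
      (PySem.List.pyRange 0 ((seq.length : Int) - n + 1) 1).foldl (fun cnt i =>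
        cnt.modify (PySem.List.slice seq (some i) (some (i + n))) 0 (· + 1)) cnt) cnt)
    PySem.Dict.empty

def find_repeated_subsequences (sequences : List (List String)) (min_len : Int) (max_len : Int) :
    List (List String × Int) :=
  let ngram_counts := pvGramCounts sequences min_len max_len
  let repeated : PySem.Dict (List String) Int :=
    ngram_counts.items.foldl (fun d p => if 2 ≤ p.2 then d.insert p.1 p.2 else d) PySem.Dict.empty
  let sorted_ngrams := PySem.List.sorted repeated.keys (fun g => g.length) true
  let final : PySem.Dict (List String) Int :=
    sorted_ngrams.foldl (fun final ngram =>
      -- for-loop with break = any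
      let is_subsequence := final.keys.any (fun existing =>
        decide (ngram.length < existing.length) &&
          PySem.Str.isIn (PySem.Str.join "->" ngram) (PySem.Str.join "->" existing))
      if is_subsequence then final else final.insert ngram (repeated.getD ngram 0))
      PySem.Dict.empty
  final.items

-- ===== PORT B =====
-- subs.add(s[i:j]) for all 0 ≤ i ≤ j ≤ len(s)
def pvAddSubs (subs : PySem.Set String) (s : String) : PySem.Set String :=
  (PySem.List.pyRange 0 (PySem.Str.len s + 1) 1).foldl (fun subs i =>
    (PySem.List.pyRange i (PySem.Str.len s + 1) 1).foldl (fun subs j =>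
      PySem.Set.add subs (PySem.Str.slice s (some i) (some j))) subs) subs

-- the body of Source B's single pass; state = (final, cur_len, pending, subs)
def pvStepB (st : PySem.Dict (List String) Int × Option Nat × List String × PySem.Set String)
    (gc : List String × Int) :
    PySem.Dict (List String) Int × Option Nat × List String × PySem.Set String :=
  let final := st.1
  let cur_len := st.2.1
  let pending := st.2.2.1
  let subs := st.2.2.2
  let flush : Bool := match cur_len with | none => true | some L => decide (gc.1.length < L)
  let subs := if flush then pending.foldl pvAddSubs subs else subs
  let pending := if flush then [] else pending
  let cur_len := if flush then some gc.1.length else cur_len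
  let gs := PySem.Str.join "->" gc.1
  if PySem.Set.contains subs gs then (final, cur_len, pending, subs)
  else (final.insert gc.1 gc.2, cur_len, pending ++ [gs], subs)

def find_repeated_subsequences_alt (sequences : List (List String)) (min_len : Int) (max_len : Int) :
    List (List String × Int) :=
  let repeated := (pvGramCounts sequences min_len max_len).items.filter (fun p => 2 ≤ p.2)
  let repeated := PySem.List.sorted repeated (fun gc => gc.1.length) true
  let st := repeated.foldl pvStepB (PySem.Dict.empty, none, [], PySem.Set.empty)
  st.1.items

-- ===== PRECONDITION & SPEC =====
def Spec_find_repeated_subsequences (sequences : List (List String)) (min_len : Int) (max_len : Int) (out : List (List String × Int)) : Prop := out = find_repeated_subsequences_alt sequences min_len max_len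
instance (sequences : List (List String)) (min_len : Int) (max_len : Int) (out : List (List String × Int)) : Decidable (Spec_find_repeated_subsequences sequences min_len max_len out) := by unfold Spec_find_repeated_subsequences; infer_instance

-- ===== CLAIM (what is proved, stated in full; the proofs are below) =====
def Claim_equal_find_repeated_subsequences : Prop := ∀ (sequences : List (List String)) (min_len : Int) (max_len : Int), Dom_find_repeated_subsequences sequences min_len max_len → Spec_find_repeated_subsequences sequences min_len max_len (find_repeated_subsequences sequences min_len max_len)

-- ===== LEMMAS AND PROOFS =====
-- ---- substring-set lemmas ----
lemma pv_mem_addSubs (subs : PySem.Set String) (s t : String) :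
    t ∈ pvAddSubs subs s ↔ t ∈ subs ∨ t.toList <:+: s.toList := by
  unfold pvAddSubs
  have houter : ∀ (l : List Int) (subs : PySem.Set String),
      t ∈ l.foldl (fun subs i =>
          (PySem.List.pyRange i (PySem.Str.len s + 1) 1).foldl
            (fun subs j => PySem.Set.add subs (PySem.Str.slice s (some i) (some j))) subs) subs
        ↔ t ∈ subs ∨ ∃ i ∈ l, ∃ j ∈ PySem.List.pyRange i (PySem.Str.len s + 1) 1,
            t = PySem.Str.slice s (some i) (some j) := by
    intro l
    induction l with
    | nil => simp
    | cons i l ih =>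
      intro subs
      rw [List.foldl_cons, ih,
        PySem.Set.mem_foldl_add (PySem.List.pyRange i (PySem.Str.len s + 1) 1)
          (fun j => PySem.Str.slice s (some i) (some j)) subs t]
      simp only [List.mem_cons]
      constructor
      · rintro ((h | ⟨j, hj, rfl⟩) | ⟨i', hi', hrest⟩)
        · exact Or.inl h
        · exact Or.inr ⟨i, Or.inl rfl, j, hj, rfl⟩
        · exact Or.inr ⟨i', Or.inr hi', hrest⟩
      · rintro (h | ⟨i', hi' | hi', hrest⟩)
        · exact Or.inl (Or.inl h)
        · subst hi'; obtain ⟨j, hj, rfl⟩ := hrest; exact Or.inl (Or.inr ⟨j, hj, rfl⟩)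
        · exact Or.inr ⟨i', hi', hrest⟩
  rw [houter]
  have hlen : PySem.Str.len s = (s.toList.length : Int) := rfl
  constructor
  · rintro (h | ⟨i, hi, j, hj, rfl⟩)
    · exact Or.inl h
    · right
      rw [PySem.List.mem_pyRange_one] at hi hj
      have h0i : 0 ≤ i := hi.1
      have hij : i ≤ j := hj.1
      have hts : (PySem.Str.slice s (some i) (some j)).toList
          = (s.toList.drop i.toNat).take (j.toNat - i.toNat) := by
        simp [PySem.Str.slice, PySem.List.slice_toNat _ h0i (le_trans h0i hij)]
      rw [hts]
      exact ((List.take_prefix _ _).isInfix).trans (s.toList.drop_suffix i.toNat).isInfix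
  · rintro (h | ⟨p, q, heq⟩)
    · exact Or.inl h
    · right
      refine ⟨(p.length : Int), ?_, (p.length : Int) + (t.toList.length : Int), ?_, ?_⟩
      · rw [PySem.List.mem_pyRange_one, hlen]
        have : p.length + t.toList.length + q.length = s.toList.length := by
          rw [← heq]; simp; omega
        omega
      · rw [PySem.List.mem_pyRange_one, hlen]
        have : p.length + t.toList.length + q.length = s.toList.length := by
          rw [← heq]; simp; omega
        omega
      · apply String.toList_inj.mp
        rw [PySem.Str.slice]
        simp only [PySem.Chars.slice_eq_listSlice, String.toList_ofList]
        rw [show ((p.length : Int) + (t.toList.length : Int)) = ((p.length : Nat) : Int) + ((t.toList.length : Nat) : Int) from rfl,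
          PySem.List.slice_natCast_add]
        rw [← heq]
        simp

lemma pv_mem_foldl_addSubs (P : List String) (subs : PySem.Set String) (t : String) :
    t ∈ P.foldl pvAddSubs subs ↔ t ∈ subs ∨ ∃ s ∈ P, t.toList <:+: s.toList := by
  induction P generalizing subs with
  | nil => simp
  | cons s P ih =>
    rw [List.foldl_cons, ih]
    simp only [pv_mem_addSubs, List.mem_cons]
    constructor
    · rintro ((h | h) | ⟨s', hs', h⟩)
      · exact Or.inl h
      · exact Or.inr ⟨s, Or.inl rfl, h⟩
      · exact Or.inr ⟨s', Or.inr hs', h⟩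
    · rintro (h | ⟨s', hs' | hs', h⟩)
      · exact Or.inl (Or.inl h)
      · subst hs'; exact Or.inl (Or.inr h)
      · exact Or.inr ⟨s', hs', h⟩

-- ---- the counting loop is a Counter of the flattened n-gram list ----
def pvGrams (sequences : List (List String)) (min_len max_len : Int) : List (List String) :=
  sequences.flatMap (fun seq =>
    (PySem.List.pyRange min_len (min (max_len + 1) ((seq.length : Int) + 1)) 1).flatMap (fun n =>
      (PySem.List.pyRange 0 ((seq.length : Int) - n + 1) 1).map (fun i =>
        PySem.List.slice seq (some i) (some (i + n)))))

lemma pvGramCounts_eq_counter (sequences : List (List String)) (min_len max_len : Int) :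
    pvGramCounts sequences min_len max_len = PySem.Dict.counter (pvGrams sequences min_len max_len) := by
  unfold pvGramCounts pvGrams
  rw [PySem.Dict.counter_eq_foldl, List.foldl_flatMap]
  refine PySem.List.foldl_congr_mem _ _ _ _ (fun cnt seq _ => ?_)
  rw [List.foldl_flatMap]
  refine PySem.List.foldl_congr_mem _ _ _ _ (fun cnt n _ => ?_)
  rw [List.foldl_map]

lemma pv_keys_counts_nodup (sequences : List (List String)) (min_len max_len : Int) :
    ((pvGramCounts sequences min_len max_len).items.map Prod.fst).Nodup := by
  have h := PySem.Dict.keys_counter (pvGrams sequences min_len max_len)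
  have : (pvGramCounts sequences min_len max_len).keys = PySem.Set.ofList (pvGrams sequences min_len max_len) := by
    rw [pvGramCounts_eq_counter]; exact h
  rw [show ((pvGramCounts sequences min_len max_len).items.map Prod.fst)
      = (pvGramCounts sequences min_len max_len).keys from rfl, this]
  exact PySem.Set.nodup_ofList _

-- ---- A's dict comprehension over nodup-key items is a filter ----
lemma pv_items_filter_fold (ps : List (List String × Int)) :
    ∀ (d : PySem.Dict (List String) Int),
      (d.items.map Prod.fst ++ ps.map Prod.fst).Nodup →
      (ps.foldl (fun d p => if 2 ≤ p.2 then d.insert p.1 p.2 else d) d).items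
        = d.items ++ ps.filter (fun p => 2 ≤ p.2) := by
  induction ps with
  | nil => intro d _; simp
  | cons p ps ih =>
    intro d hnd
    have hp1 : p.1 ∉ d.items.map Prod.fst := by
      intro hmem
      exact ((List.nodup_append.mp hnd).2.2 p.1 hmem p.1 (by simp)) rfl
    rw [List.foldl_cons]
    by_cases h2 : (2 : Int) ≤ p.2
    · have hcon : d.contains p.1 = false := by
        rw [Bool.eq_false_iff]
        intro hc
        exact hp1 ((PySem.Dict.contains_iff_mem_keys d p.1).mp hc)
      have hins : (d.insert p.1 p.2).items = d.items ++ [(p.1, p.2)] :=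
        PySem.Dict.items_insert_of_not_contains d p.2 hcon
      rw [if_pos h2, ih _ (by
        rw [hins]
        simpa [List.append_assoc] using hnd), hins]
      simp [h2]
    · rw [if_neg h2, ih _ (hnd.sublist (by
        simp only [List.map_cons]; exact List.Sublist.append_left (List.sublist_cons_self p.1 (ps.map Prod.fst)) (d.items.map Prod.fst)))]
      simp [h2]

-- ---- stability: sorting the keys is sorting the items and projecting ----
lemma pv_insertBy_map {α β : Type} (f : α → β) (bef : β → β → Bool) (x : α) (l : List α) :
    PySem.List.insertBy bef (f x) (l.map f)
      = (PySem.List.insertBy (fun a b => bef (f a) (f b)) x l).map f := by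
  induction l with
  | nil => rfl
  | cons y l ih =>
    simp only [List.map_cons, PySem.List.insertBy]
    by_cases h : bef (f x) (f y) = true
    · rw [if_pos h, if_pos h]; simp
    · rw [if_neg h, if_neg h]; simp [ih]

lemma pv_sorted_map_fst (ps : List (List String × Int)) :
    PySem.List.sorted (ps.map Prod.fst) (fun g => g.length) true
      = (PySem.List.sorted ps (fun gc => gc.1.length) true).map Prod.fst := by
  show (ps.map Prod.fst).foldl
      (fun acc x => PySem.List.insertBy (fun a b => decide (b.length < a.length)) x acc) []
    = ((ps.foldl (fun acc x =>
        PySem.List.insertBy (fun a b => decide (b.1.length < a.1.length)) x acc) []).map Prod.fst)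
  rw [List.foldl_map]
  have : ∀ (l : List (List String × Int)) (acc : List (List String × Int)),
      l.foldl (fun acc x => PySem.List.insertBy (fun a b => decide (b.length < a.length)) x.1 acc)
          (acc.map Prod.fst)
        = (l.foldl (fun acc x =>
            PySem.List.insertBy (fun a b => decide (b.1.length < a.1.length)) x acc) acc).map Prod.fst := by
    intro l
    induction l with
    | nil => intro acc; rfl
    | cons x l ih =>
      intro acc
      rw [List.foldl_cons, List.foldl_cons,
        pv_insertBy_map Prod.fst (fun a b => decide (b.length < a.length)) x acc, ih]
  exact this ps []

-- ---- looking a sorted item's key back up in the filtered dict ----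
lemma pv_getD_items {d : PySem.Dict (List String) Int} {gc : List String × Int}
    (hnd : d.keys.Nodup) (hmem : gc ∈ d.items) : d.getD gc.1 0 = gc.2 := by
  have h := PySem.Dict.get?_of_mem_items d (k := gc.1) (v := gc.2) hmem hnd
  rw [PySem.Dict.getD_eq_get?_getD, h]
  rfl

-- ---- the loop over the sorted n-grams ----
def pvStepA (final : PySem.Dict (List String) Int) (gc : List String × Int) :
    PySem.Dict (List String) Int :=
  if final.keys.any (fun existing =>
      decide (gc.1.length < existing.length) &&
        PySem.Str.isIn (PySem.Str.join "->" gc.1) (PySem.Str.join "->" existing))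
  then final else final.insert gc.1 gc.2

def pvInv (final : PySem.Dict (List String) Int) (cur : Option Nat) (pending : List String)
    (subs : PySem.Set String) : Prop :=
  match cur with
  | none => final = PySem.Dict.empty ∧ pending = [] ∧ subs = []
  | some L =>
      (∀ e ∈ final.keys, L ≤ e.length)
      ∧ (∀ t : String, t ∈ subs ↔ ∃ e ∈ final.keys, L < e.length
            ∧ t.toList <:+: (PySem.Str.join "->" e).toList)
      ∧ (∀ s : String, s ∈ pending ↔ ∃ e ∈ final.keys, e.length = L
            ∧ s = PySem.Str.join "->" e)

lemma pv_step (final : PySem.Dict (List String) Int) (cur : Option Nat) (pending : List String)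
    (subs : PySem.Set String) (gc : List String × Int)
    (hle : ∀ L, cur = some L → gc.1.length ≤ L)
    (hInv : pvInv final cur pending subs) :
    ∃ pending' subs',
      pvStepB (final, cur, pending, subs) gc
          = (pvStepA final gc, some gc.1.length, pending', subs')
        ∧ pvInv (pvStepA final gc) (some gc.1.length) pending' subs' := by
  -- the flushed substring set characterizes exactly A's pairwise containment scan
  have hsubs1 : ∀ t : String,
      t ∈ (if (match cur with | none => true | some L => decide (gc.1.length < L))
            then pending.foldl pvAddSubs subs else subs)
        ↔ ∃ e ∈ final.keys, gc.1.length < e.length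
            ∧ t.toList <:+: (PySem.Str.join "->" e).toList := by
    intro t
    match cur with
    | none =>
      obtain ⟨hf, hp, hs⟩ := hInv
      subst hf hp hs
      simp [PySem.Dict.keys, PySem.Dict.empty]
    | some L =>
      obtain ⟨hlen, hsub, hpend⟩ := hInv
      have hgl : gc.1.length ≤ L := hle L rfl
      by_cases hflush : gc.1.length < L
      · rw [if_pos (by simpa using hflush)]
        rw [pv_mem_foldl_addSubs]
        constructor
        · rintro (h | ⟨s, hs, hinf⟩)
          · obtain ⟨e, he, hLe, hinf⟩ := (hsub t).mp h
            exact ⟨e, he, lt_trans hflush hLe, hinf⟩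
          · obtain ⟨e, he, heL, rfl⟩ := (hpend s).mp hs
            exact ⟨e, he, heL ▸ hflush, hinf⟩
        · rintro ⟨e, he, hgc, hinf⟩
          rcases Nat.lt_or_ge L e.length with hL | hL
          · exact Or.inl ((hsub t).mpr ⟨e, he, hL, hinf⟩)
          · have : e.length = L := le_antisymm hL (hlen e he)
            exact Or.inr ⟨PySem.Str.join "->" e, (hpend _).mpr ⟨e, he, this, rfl⟩, hinf⟩
      · have hL : L = gc.1.length := le_antisymm (Nat.le_of_not_lt hflush) hgl
        rw [if_neg (by simpa using hflush)]
        subst hL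
        exact hsub t
  set gs := PySem.Str.join "->" gc.1 with hgs
  set flush := (match cur with | none => true | some L => decide (gc.1.length < L)) with hflushdef
  set subs1 := if flush then pending.foldl pvAddSubs subs else subs with hsubs1def
  set pending1 := if flush then [] else pending with hpend1def
  set cur1 := if flush then some gc.1.length else cur with hcur1def
  have hstep : pvStepB (final, cur, pending, subs) gc
      = if PySem.Set.contains subs1 gs then (final, cur1, pending1, subs1)
        else (final.insert gc.1 gc.2, cur1, pending1 ++ [gs], subs1) := rfl
  have hlen' : ∀ e ∈ final.keys, gc.1.length ≤ e.length := by
    intro e he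
    match cur, hInv with
    | none, ⟨hf, _, _⟩ => subst hf; simp [PySem.Dict.keys, PySem.Dict.empty] at he
    | some L, ⟨hlen, _, _⟩ => exact le_trans (hle L rfl) (hlen e he)
  have hcur1 : cur1 = some gc.1.length := by
    match cur, hle with
    | none, _ => simp [hcur1def, hflushdef]
    | some L, hle =>
      by_cases h : gc.1.length < L
      · simp [hcur1def, hflushdef, h]
      · have hLg : L = gc.1.length := le_antisymm (Nat.le_of_not_lt h) (hle L rfl)
        simp [hcur1def, hflushdef, hLg]
  have hpend1 : ∀ s : String, s ∈ pending1
      ↔ ∃ e ∈ final.keys, e.length = gc.1.length ∧ s = PySem.Str.join "->" e := by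
    intro s
    rw [hpend1def]
    match cur, hInv with
    | none, ⟨hf, hp, _⟩ =>
      subst hf hp
      simp [PySem.Dict.keys, PySem.Dict.empty, hflushdef]
    | some L, ⟨hlen, _, hpend⟩ =>
      by_cases h : gc.1.length < L
      · rw [hflushdef]
        simp only [h, decide_true, if_true]
        constructor
        · intro hs; simp at hs
        · rintro ⟨e, he, helen, rfl⟩
          exact absurd (helen ▸ hlen e he) (Nat.not_le_of_lt h)
      · have hLg : L = gc.1.length := le_antisymm (Nat.le_of_not_lt h) (hle L rfl)
        rw [hflushdef]
        simp only [h, decide_false]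
        rw [← hLg]
        exact hpend s
  have hdec : PySem.Set.contains subs1 gs
      = final.keys.any (fun existing =>
          decide (gc.1.length < existing.length) &&
            PySem.Str.isIn (PySem.Str.join "->" gc.1) (PySem.Str.join "->" existing)) := by
    rw [Bool.eq_iff_iff, PySem.Set.contains_iff, List.any_eq_true, hsubs1 gs]
    constructor
    · rintro ⟨e, he, hl, hinf⟩
      refine ⟨e, he, ?_⟩
      rw [Bool.and_eq_true]
      exact ⟨decide_eq_true hl, (PySem.Str.isIn_iff_infix _ _).mpr (hgs ▸ hinf)⟩
    · rintro ⟨e, he, hpred⟩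
      rw [Bool.and_eq_true, decide_eq_true_iff, PySem.Str.isIn_iff_infix] at hpred
      exact ⟨e, he, hpred.1, hpred.2⟩
  cases hA : final.keys.any (fun existing =>
      decide (gc.1.length < existing.length) &&
        PySem.Str.isIn (PySem.Str.join "->" gc.1) (PySem.Str.join "->" existing)) with
  | true =>
    refine ⟨pending1, subs1, ?_, ?_⟩
    · rw [hstep, hdec, hcur1, pvStepA, hA]
      simp only [if_true]
    · refine ⟨?_, ?_, ?_⟩
      · intro e he
        rw [pvStepA, hA] at he
        simp only [if_true] at he
        exact hlen' e he
      · intro t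
        rw [pvStepA, hA]
        simp only [if_true]
        exact hsubs1 t
      · intro s
        rw [pvStepA, hA]
        simp only [if_true]
        exact hpend1 s
  | false =>
    refine ⟨pending1 ++ [gs], subs1, ?_, ?_⟩
    · rw [hstep, hdec, hcur1, pvStepA, hA]
      simp only [Bool.false_eq_true, if_false]
    · rw [pvStepA, hA]
      simp only [Bool.false_eq_true, if_false]
      refine ⟨?_, ?_, ?_⟩
      · intro e he
        rcases (PySem.Dict.mem_keys_insert final gc.1 e gc.2).mp he with rfl | he
        · exact le_refl _
        · exact hlen' e he
      · intro t
        rw [hsubs1 t]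
        constructor
        · rintro ⟨e, he, hl, hinf⟩
          exact ⟨e, (PySem.Dict.mem_keys_insert final gc.1 e gc.2).mpr (Or.inr he), hl, hinf⟩
        · rintro ⟨e, he, hl, hinf⟩
          rcases (PySem.Dict.mem_keys_insert final gc.1 e gc.2).mp he with rfl | he
          · exact absurd hl (lt_irrefl _)
          · exact ⟨e, he, hl, hinf⟩
      · intro s
        rw [List.mem_append, hpend1 s]
        constructor
        · rintro (⟨e, he, hl, rfl⟩ | hs)
          · exact ⟨e, (PySem.Dict.mem_keys_insert final gc.1 e gc.2).mpr (Or.inr he), hl, rfl⟩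
          · simp only [List.mem_singleton] at hs
            subst hs
            exact ⟨gc.1, (PySem.Dict.mem_keys_insert final gc.1 gc.1 gc.2).mpr (Or.inl rfl), rfl, hgs⟩
        · rintro ⟨e, he, hl, rfl⟩
          rcases (PySem.Dict.mem_keys_insert final gc.1 e gc.2).mp he with rfl | he
          · exact Or.inr (by simp [hgs])
          · exact Or.inl ⟨e, he, hl, rfl⟩

lemma pv_core (l : List (List String × Int)) :
    ∀ (final : PySem.Dict (List String) Int) (cur : Option Nat) (pending : List String)
      (subs : PySem.Set String),
      l.Pairwise (fun a b => b.1.length ≤ a.1.length) →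
      (∀ gc ∈ l, ∀ L, cur = some L → gc.1.length ≤ L) →
      pvInv final cur pending subs →
      (l.foldl pvStepB (final, cur, pending, subs)).1 = l.foldl pvStepA final := by
  induction l with
  | nil => intro final cur pending subs _ _ _; rfl
  | cons gc l ih =>
    intro final cur pending subs hpw hle hInv
    obtain ⟨pending', subs', hstep, hInv'⟩ :=
      pv_step final cur pending subs gc (fun L hL => hle gc (by simp) L hL) hInv
    rw [List.foldl_cons, List.foldl_cons, hstep]
    exact ih (pvStepA final gc) (some gc.1.length) pending' subs'
      (List.pairwise_cons.mp hpw).2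
      (fun gc' hgc' L hL => by
        cases hL
        exact (List.pairwise_cons.mp hpw).1 gc' hgc')
      hInv'

theorem pv_main (sequences : List (List String) ) (min_len : Int) (max_len : Int) :
    find_repeated_subsequences sequences min_len max_len
      = find_repeated_subsequences_alt sequences min_len max_len := by
  unfold find_repeated_subsequences find_repeated_subsequences_alt
  dsimp only
  set c := pvGramCounts sequences min_len max_len with hc
  set F := c.items.filter (fun p => decide ((2:Int) ≤ p.2)) with hF
  have hndAll : (c.items.map Prod.fst).Nodup := pv_keys_counts_nodup sequences min_len max_len
  -- repeated dict's items are the filtered items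
  have hrep : (c.items.foldl (fun d p => if 2 ≤ p.2 then d.insert p.1 p.2 else d)
      PySem.Dict.empty).items = F := by
    have := pv_items_filter_fold c.items PySem.Dict.empty (by
      simpa [PySem.Dict.empty] using hndAll)
    simpa [PySem.Dict.empty] using this
  set rep := c.items.foldl (fun d p => if 2 ≤ p.2 then d.insert p.1 p.2 else d)
      PySem.Dict.empty with hrepd
  have hkeys : rep.keys = F.map Prod.fst := by
    rw [PySem.Dict.keys, hrep]
  have hndF : (F.map Prod.fst).Nodup :=
    hndAll.sublist (List.filter_sublist.map Prod.fst)
  set S := PySem.List.sorted F (fun gc => gc.1.length) true with hS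
  have hsortk : PySem.List.sorted rep.keys (fun g => g.length) true = S.map Prod.fst := by
    rw [hkeys, pv_sorted_map_fst]
  -- A's loop over sorted keys = loop over sorted items
  have hA : (PySem.List.sorted rep.keys (fun g => g.length) true).foldl
      (fun final ngram =>
        if final.keys.any (fun existing =>
            decide (ngram.length < existing.length) &&
              PySem.Str.isIn (PySem.Str.join "->" ngram) (PySem.Str.join "->" existing))
        then final else final.insert ngram (rep.getD ngram 0)) PySem.Dict.empty
      = S.foldl pvStepA PySem.Dict.empty := by
    rw [hsortk, List.foldl_map]
    refine PySem.List.foldl_congr_mem _ _ _ _ (fun final gc hgc => ?_)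
    have hmem : gc ∈ F := by
      rw [hS] at hgc
      exact (PySem.List.mem_sorted _ _ _ _).mp hgc
    have hgd : rep.getD gc.1 0 = gc.2 :=
      pv_getD_items (by rw [hkeys]; exact hndF) (by rw [hrep]; exact hmem)
    rw [pvStepA, hgd]
  rw [hA]
  have hcore := pv_core S PySem.Dict.empty none [] []
    (PySem.List.sorted_pairwise_rev F (fun gc => gc.1.length))
    (by intro gc _ L h; cases h)
    ⟨rfl, rfl, rfl⟩
  rw [← hcore]
  rfl

-- ===== VERDICT (by name: the statement is the Claim_ definition above) =====
theorem find_repeated_subsequences_spec : Claim_equal_find_repeated_subsequences := by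
  intro sequences min_len max_len _
  exact pv_main sequences min_len max_len
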